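-- pv_equiv track=rewrite | github.com/guardadd8/CS362-Project | task.py | conv_endian
-- ===== SOURCE A (Python) =====
-- def conv_endian(num, endian='big'):
--     """
--     Return the integer in hex in endian order.
--
--     This function takes a negative or positive number
--     and currently returns the value in hex format in
--     big or little endian order.
--
--     Args:
--         num (str): Integer number.
--         endian (str): Order of hex value.
--
--     Returns:
--         str: Hex value in endian order, or None if
--         endian is not "big" or "little"
--     """
--     if not isinstance(num, int):
--         return None
--
--     if endian not in ["big", "little"]:
--         return None
--
--     hex_digits = "0123456789ABCDEF"
--     hex_number = ""
--     i = 0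
--     negative = False
--
--     if num == 0:
--         return "00"
--
--     if num < 0:
--         negative = True
--         num = abs(num)
--
--     while num > 0:
--         hex_digit = hex_digits[num % 16]
--
--         if i % 2 == 0 and i != 0:
--             hex_number = hex_digit + " " + hex_number
--
--         else:
--             hex_number = hex_digit + hex_number
--         num = num // 16
--         i += 1
--
--     if i % 2 != 0:
--         hex_number = "0" + hex_number
--
--     if endian == "little":
--         hex_number = " ".join(hex_number.split()[::-1])
--
--     if negative:
--         hex_number = "-" + hex_number
--
--     return hex_number
-- ===== SOURCE B (Python) =====
-- def conv_endian(num, endian='big'):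
--     """Hex of num grouped in byte pairs, big or little endian; None on bad args."""
--     if not isinstance(num, int):
--         return None
--     if endian not in ("big", "little"):
--         return None
--     s = format(abs(num), 'X')
--     if len(s) % 2:
--         s = '0' + s
--     groups = []
--     while s:
--         groups.append(s[:2])
--         s = s[2:]
--     if endian == 'little':
--         groups.reverse()
--     out = ' '.join(groups)
--     return '-' + out if num < 0 else out
-- ===== Notes on version B (the rewrite author's own statement) =====
-- stated objective: simpler
-- what changed: A builds the spaced hex string digit-by-digit in a while loop with a parity counter deciding where to insert spaces; B formats the magnitude to a hex string once, pads to even length, chunks it into byte pairs and joins (reversed for little endian).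
import Mathlib
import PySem

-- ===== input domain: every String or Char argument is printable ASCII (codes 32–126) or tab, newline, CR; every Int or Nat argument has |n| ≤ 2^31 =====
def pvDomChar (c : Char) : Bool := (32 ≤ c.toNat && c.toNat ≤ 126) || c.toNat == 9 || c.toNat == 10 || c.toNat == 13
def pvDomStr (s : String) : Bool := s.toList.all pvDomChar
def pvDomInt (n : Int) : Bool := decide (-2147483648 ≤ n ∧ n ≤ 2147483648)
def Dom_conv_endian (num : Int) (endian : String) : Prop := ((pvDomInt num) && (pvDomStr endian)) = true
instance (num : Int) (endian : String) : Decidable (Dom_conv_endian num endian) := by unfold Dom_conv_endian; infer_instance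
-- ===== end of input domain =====

-- B replaces A's digit-by-digit loop (space insertion driven by a parity counter) by
-- format-then-chunk: hex string of |num| once, padded to even length, chunked into byte pairs, joined.

-- ===== PORT A =====
def pyHexDigits : List Char :=
  ['0','1','2','3','4','5','6','7','8','9','A','B','C','D','E','F']

-- A's while loop: state (num, hex_number, i); returns (hex_number, i) at exit.
def convALoop (num : Int) (hexNumber : List Char) (i : Nat) : List Char × Nat :=
  if hpos : num > 0 then
    let d := (PySem.List.pyGet? pyHexDigits (PySem.Int.mod num 16)).getD '0'
    let hexNumber' := if i % 2 = 0 ∧ i ≠ 0 then d :: ' ' :: hexNumber else d :: hexNumber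
    convALoop (PySem.Int.floordiv num 16) hexNumber' (i + 1)
  else (hexNumber, i)
termination_by num.toNat
decreasing_by
  have h16 : PySem.Int.floordiv num 16 = num / 16 := PySem.Int.floordiv_eq_ediv_of_pos (by omega)
  omega

def conv_endian (num : Int) (endian : String) : Option String :=
  if ¬ (endian = "big" ∨ endian = "little") then none
  else if num = 0 then some "00"
  else
    let negative := num < 0
    let n := if num < 0 then |num| else num
    let r := convALoop n [] 0
    let hx := r.1
    let i := r.2
    let hx := if i % 2 ≠ 0 then '0' :: hx else hx
    let hx := if endian = "little" then
        PySem.Chars.join [' '] ((PySem.Chars.split₀ hx).reverse)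
      else hx
    let hx := if negative then '-' :: hx else hx
    some (String.ofList hx)

-- ===== PORT B =====
-- format(n, 'X'): uppercase hex of a natural number, most significant digit first.
def hexU (n : Nat) : List Char :=
  if n < 16 then [pyHexDigits.getD n '0']
  else hexU (n / 16) ++ [pyHexDigits.getD (n % 16) '0']
termination_by n
decreasing_by exact Nat.div_lt_self (by omega) (by omega)

-- B's while loop: groups.append(s[:2]); s = s[2:].
def chunk2 (s : List Char) : List (List Char) :=
  if s = [] then []
  else PySem.List.slice s none (some 2) :: chunk2 (PySem.List.slice s (some 2) none)
termination_by s.length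
decreasing_by
  rw [PySem.List.slice_from s (by omega)]
  cases s with
  | nil => simp_all
  | cons a t => simp

def conv_endian_alt (num : Int) (endian : String) : Option String :=
  if endian = "big" ∨ endian = "little" then
    let s := hexU num.natAbs
    let s := if s.length % 2 = 1 then '0' :: s else s
    let groups := chunk2 s
    let groups := if endian = "little" then groups.reverse else groups
    let out := PySem.Chars.join [' '] groups
    some (String.ofList (if num < 0 then '-' :: out else out))
  else none

-- ===== PRECONDITION & SPEC =====
def Spec_conv_endian (num : Int) (endian : String) (out : Option String) : Prop := out = conv_endian_alt num endian
instance (num : Int) (endian : String) (out : Option String) : Decidable (Spec_conv_endian num endian out) := by unfold Spec_conv_endian; infer_instance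

-- ===== CLAIM (what is proved, stated in full; the proofs are below) =====
def Claim_equal_conv_endian : Prop := ∀ (num : Int) (endian : String), Dom_conv_endian num endian → Spec_conv_endian num endian (conv_endian num endian)

-- ===== LEMMAS AND PROOFS =====

-- LSB-first digit list of n (the order A's loop consumes digits).
def revDigits (n : Nat) : List Char :=
  if n = 0 then []
  else pyHexDigits.getD (n % 16) '0' :: revDigits (n / 16)
termination_by n
decreasing_by exact Nat.div_lt_self (by omega) (by omega)

-- the body of A's loop as a pure list recursion over the LSB-first digits
def gA : List Char → Nat → List Char → List Char
  | [], _, acc => acc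
  | d :: ds, i, acc => gA ds (i + 1) (if i % 2 = 0 ∧ i ≠ 0 then d :: ' ' :: acc else d :: acc)

theorem convALoop_eq (n : Nat) : ∀ (i : Nat) (acc : List Char),
    convALoop (n : Int) acc i = (gA (revDigits n) i acc, i + (revDigits n).length) := by
  induction n using Nat.strong_induction_on with
  | _ n ih =>
    intro i acc
    by_cases h0 : n = 0
    · subst h0
      rw [convALoop, revDigits]
      simp [gA]
    · rw [convALoop, revDigits]
      have hpos : (0 : Int) < (n : Int) := by exact_mod_cast Nat.pos_of_ne_zero h0
      have hdig : (PySem.List.pyGet? pyHexDigits (PySem.Int.mod (n : Int) 16)).getD '0'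
          = pyHexDigits.getD (n % 16) '0' := by
        have hm := PySem.Int.mod_natCast n 16
        rw [show ((16 : Nat) : Int) = (16 : Int) from by norm_num] at hm
        rw [hm]
        simp only [PySem.List.pyGet?_natCast, List.getD_eq_getElem?_getD]
      have hdiv : PySem.Int.floordiv (n : Int) 16 = ((n / 16 : Nat) : Int) := by
        have hd := PySem.Int.floordiv_natCast n 16
        rw [show ((16 : Nat) : Int) = (16 : Int) from by norm_num] at hd
        exact hd
      simp only [hpos, dif_pos, h0, if_neg, not_false_iff]
      rw [hdig, hdiv, ih (n / 16) (Nat.div_lt_self (Nat.pos_of_ne_zero h0) (by omega))]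
      simp [gA]
      omega

theorem gA_acc (ds : List Char) : ∀ (i : Nat) (acc : List Char),
    gA ds i acc = gA ds i [] ++ acc := by
  induction ds with
  | nil => intro i acc; simp [gA]
  | cons d t ih =>
    intro i acc
    by_cases h : i % 2 = 0 ∧ i ≠ 0
    · simp only [gA, if_pos h]
      rw [ih (i+1) (d :: ' ' :: acc), ih (i+1) (d :: ' ' :: [])]
      simp
    · simp only [gA, if_neg h]
      rw [ih (i+1) (d :: acc), ih (i+1) (d :: [])]
      simp

theorem gA_par (ds : List Char) : ∀ (i j : Nat), i % 2 = j % 2 → 1 ≤ i → 1 ≤ j →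
    gA ds i [] = gA ds j [] := by
  induction ds with
  | nil => intros; simp [gA]
  | cons d t ih =>
    intro i j hpar hi hj
    have hcond : (i % 2 = 0 ∧ i ≠ 0) ↔ (j % 2 = 0 ∧ j ≠ 0) := by omega
    by_cases h : i % 2 = 0 ∧ i ≠ 0
    · simp only [gA, if_pos h, if_pos (hcond.mp h)]
      rw [gA_acc t (i+1), gA_acc t (j+1), ih (i+1) (j+1) (by omega) (by omega) (by omega)]
    · simp only [gA, if_neg h, if_neg (fun hj' => h (hcond.mpr hj'))]
      rw [gA_acc t (i+1), gA_acc t (j+1), ih (i+1) (j+1) (by omega) (by omega) (by omega)]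

theorem gA_two (ds : List Char) (h : ds ≠ []) : gA ds 2 [] = gA ds 0 [] ++ [' '] := by
  cases ds with
  | nil => exact absurd rfl h
  | cons e t =>
    simp only [gA]
    norm_num
    rw [gA_acc t 3 [e, ' '], gA_acc t 1 [e], gA_par t 3 1 (by omega) (by omega) (by omega)]
    simp

theorem chunk2_nil : chunk2 [] = [] := by rw [chunk2]; simp

theorem chunk2_cons_cons (a b : Char) (t : List Char) :
    chunk2 (a :: b :: t) = [a, b] :: chunk2 t := by
  rw [chunk2]
  rw [PySem.List.slice_to _ (by omega : (0:Int) ≤ 2), PySem.List.slice_from _ (by omega : (0:Int) ≤ 2)]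
  simp

theorem chunk2_single (a : Char) : chunk2 [a] = [[a]] := by
  rw [chunk2]
  rw [PySem.List.slice_to _ (by omega : (0:Int) ≤ 2), PySem.List.slice_from _ (by omega : (0:Int) ≤ 2)]
  simp [chunk2_nil]

theorem chunk2_append_even : ∀ (k : Nat) (s t : List Char), s.length ≤ k → s.length % 2 = 0 →
    chunk2 (s ++ t) = chunk2 s ++ chunk2 t := by
  intro k
  induction k using Nat.strong_induction_on with
  | _ k ih =>
    intro s t
    match s with
    | [] => intro _ _; simp [chunk2_nil]
    | [a] => intro _ hev; simp at hev
    | a :: b :: s'' =>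
      intro hk hev
      simp only [List.cons_append, chunk2_cons_cons]
      rw [ih (s''.length + 1) (by simp at hk; omega) s'' t (by omega) (by simp at hev; omega)]

-- every chunk of chunk2 s is a nonempty sublist of s's characters
theorem chunk2_groups : ∀ (k : Nat) (s : List Char), s.length ≤ k →
    ∀ g ∈ chunk2 s, g ≠ [] ∧ ∀ c ∈ g, c ∈ s := by
  intro k
  induction k using Nat.strong_induction_on with
  | _ k ih =>
    intro s
    match s with
    | [] => intro _ g hg; rw [chunk2_nil] at hg; simp at hg
    | [a] =>
      intro _ g hg
      rw [chunk2_single] at hg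
      simp at hg
      subst hg; simp
    | a :: b :: s'' =>
      intro hk g hg
      rw [chunk2_cons_cons] at hg
      rcases List.mem_cons.mp hg with hg | hg
      · subst hg; simp
      · obtain ⟨h1, h2⟩ := ih (s''.length + 1) (by simp at hk; omega) s'' (by omega) g hg
        exact ⟨h1, fun c hc => by simpa using Or.inr (Or.inr (h2 c hc))⟩

theorem join_append_pair (gs : List (List Char)) (g : List Char) (h : gs ≠ []) :
    PySem.Chars.join [' '] (gs ++ [g]) = PySem.Chars.join [' '] gs ++ ' ' :: g := by
  induction gs with
  | nil => exact absurd rfl h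
  | cons p t ih =>
    cases t with
    | nil => rw [PySem.Chars.join_singleton]; simp [PySem.Chars.join_cons_cons]
    | cons q r =>
      simp only [List.cons_append]
      rw [PySem.Chars.join_cons_cons]
      rw [← List.cons_append, ih (by simp)]
      rw [PySem.Chars.join_cons_cons]
      simp

-- pad to even length with a leading '0'
def padEven (s : List Char) : List Char := if s.length % 2 = 1 then '0' :: s else s

-- MAIN: A's loop output (with its parity padding) = join of the byte-pair chunks of the
-- padded MSB-first digit string.
theorem main_chunks : ∀ (k : Nat) (R : List Char), R.length ≤ k →
    (if R.length % 2 ≠ 0 then '0' :: gA R 0 [] else gA R 0 [])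
      = PySem.Chars.join [' '] (chunk2 (padEven R.reverse)) := by
  intro k
  induction k using Nat.strong_induction_on with
  | _ k ih =>
    intro R hlen
    match R with
    | [] => simp [gA, padEven, chunk2_nil, PySem.Chars.join_nil]
    | [d] =>
      simp [gA, padEven, chunk2_cons_cons, chunk2_nil, PySem.Chars.join_singleton]
    | d0 :: d1 :: R' =>
      have hrev : (d0 :: d1 :: R').reverse = R'.reverse ++ [d1, d0] := by simp
      have hlenR : (d0 :: d1 :: R').length = R'.length + 2 := by simp
      have hg : gA (d0 :: d1 :: R') 0 [] = gA R' 2 [d1, d0] := by simp [gA]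
      by_cases hR' : R' = []
      · subst hR'
        simp [gA, padEven, chunk2_cons_cons, chunk2_nil, PySem.Chars.join_singleton]
      · -- inner part
        have hpadlen : (padEven R'.reverse).length % 2 = 0 := by
          simp only [padEven]
          split <;> simp_all
          omega
        have hpad : padEven ((d0 :: d1 :: R').reverse) = padEven R'.reverse ++ [d1, d0] := by
          rw [hrev]
          simp only [padEven, List.length_append, List.length_reverse, List.length_cons,
            List.length_nil]
          split_ifs with ha hb hb
          · simp
          · omega
          · omega
          · rfl
        have hchunk : chunk2 (padEven ((d0 :: d1 :: R').reverse))
            = chunk2 (padEven R'.reverse) ++ [[d1, d0]] := by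
          rw [hpad, chunk2_append_even (padEven R'.reverse).length _ _ le_rfl hpadlen,
            chunk2_cons_cons, chunk2_nil]
        have hpadne : padEven R'.reverse ≠ [] := by
          simp only [padEven]; split <;> simp_all
        have hchne : chunk2 (padEven R'.reverse) ≠ [] := by
          rw [chunk2]; split <;> simp_all
        rw [hchunk, join_append_pair _ _ hchne]
        rw [← ih (R'.length + 1) (by omega) R' (by omega)]
        rw [hg, gA_acc R' 2 [d1, d0], gA_two R' hR']
        have hmod : (d0 :: d1 :: R').length % 2 = R'.length % 2 := by simp; omega
        rw [hmod]
        split <;> simp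
-- (the '0' pad lands on the most significant group in both)

theorem hexU_eq_rev : ∀ (m : Nat), 1 ≤ m → hexU m = (revDigits m).reverse := by
  intro m
  induction m using Nat.strong_induction_on with
  | _ m ih =>
    intro hm
    rw [hexU, revDigits]
    by_cases h16 : m < 16
    · have hmod : m % 16 = m := Nat.mod_eq_of_lt h16
      have hd0 : m / 16 = 0 := Nat.div_eq_of_lt h16
      rw [if_pos h16, if_neg (show ¬ m = 0 by omega), hmod, hd0, revDigits]
      simp
    · have hdiv : 1 ≤ m / 16 := Nat.one_le_div_iff (by omega) |>.mpr (by omega)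
      rw [if_neg h16, if_neg (show ¬ m = 0 by omega)]
      rw [ih (m / 16) (Nat.div_lt_self (by omega) (by omega)) hdiv]
      simp

theorem hexdig_mem (k : Nat) : pyHexDigits.getD k '0' ∈ pyHexDigits := by
  by_cases hk : k < 16
  · interval_cases k <;> decide
  · rw [List.getD_eq_default]
    · decide
    · simp [pyHexDigits]; omega

theorem hexU_chars : ∀ (m : Nat), ∀ c ∈ hexU m, c ∈ pyHexDigits := by
  intro m
  induction m using Nat.strong_induction_on with
  | _ m ih =>
    intro c hc
    rw [hexU] at hc
    by_cases h16 : m < 16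
    · rw [if_pos h16] at hc
      simp only [List.mem_singleton] at hc
      subst hc
      exact hexdig_mem m
    · rw [if_neg h16] at hc
      rcases List.mem_append.mp hc with h | h
      · exact ih (m / 16) (Nat.div_lt_self (by omega) (by omega)) c h
      · simp only [List.mem_singleton] at h
        subst h
        exact hexdig_mem (m % 16)

-- split₀ inverts our space-join of nonempty space-free groups
theorem split0_go_nonspace (g : List Char) : ∀ rest cur acc,
    (∀ c ∈ g, PySem.Chars.isspace c = false) →
    PySem.Chars.split₀.go (g ++ rest) cur acc
      = PySem.Chars.split₀.go rest (g.reverse ++ cur) acc := by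
  induction g with
  | nil => intros; simp
  | cons c t ih =>
    intro rest cur acc hns
    rw [List.cons_append, PySem.Chars.split₀.go]
    have hc : PySem.Chars.isspace c = false := hns c (by simp)
    simp only [hc, Bool.false_eq_true, if_false]
    rw [ih rest (c :: cur) acc (fun x hx => hns x (by simp [hx]))]
    simp

theorem split0_go_space (rest : List Char) (cur : List Char) (acc : List (List Char)) :
    PySem.Chars.split₀.go (' ' :: rest) cur acc
      = if cur.isEmpty then PySem.Chars.split₀.go rest [] acc
        else PySem.Chars.split₀.go rest [] (cur.reverse :: acc) := by
  rw [PySem.Chars.split₀.go]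
  simp [show PySem.Chars.isspace ' ' = true from by decide]

theorem split0_join (gs : List (List Char)) :
    gs ≠ [] → (∀ g ∈ gs, g ≠ [] ∧ ∀ c ∈ g, PySem.Chars.isspace c = false) →
    ∀ acc, PySem.Chars.split₀.go (PySem.Chars.join [' '] gs) [] acc = acc.reverse ++ gs := by
  induction gs with
  | nil => intro h; exact absurd rfl h
  | cons g t ih =>
    intro _ hok acc
    obtain ⟨hgne, hgns⟩ := hok g (by simp)
    cases t with
    | nil =>
      rw [PySem.Chars.join_singleton]
      have := split0_go_nonspace g [] [] acc hgns
      simp only [List.append_nil] at this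
      rw [this, PySem.Chars.split₀.go]
      simp [hgne]
    | cons q r =>
      rw [PySem.Chars.join_cons_cons]
      rw [List.append_assoc]
      rw [split0_go_nonspace g _ [] acc hgns]
      simp only [List.singleton_append]
      rw [split0_go_space]
      have : (g.reverse ++ []).isEmpty = false := by
        simp [hgne]
      rw [this]
      simp only [Bool.false_eq_true, if_false, List.append_nil, List.reverse_reverse]
      rw [ih (by simp) (fun x hx => hok x (by simp [hx])) (g :: acc)]
      simp

-- assembled big-endian equality for num ≠ 0
theorem hx_eq (m : Nat) (hm : 1 ≤ m) :
    (if (0 + (revDigits m).length) % 2 ≠ 0 then '0' :: gA (revDigits m) 0 [] else gA (revDigits m) 0 [])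
      = PySem.Chars.join [' ']
          (chunk2 (if (hexU m).length % 2 = 1 then '0' :: hexU m else hexU m)) := by
  have h1 := main_chunks (revDigits m).length (revDigits m) le_rfl
  rw [hexU_eq_rev m hm]
  rw [Nat.zero_add]
  rw [h1]
  simp only [padEven, List.length_reverse]

-- the chunk list of the padded hex string: nonempty, groups nonempty and space-free
theorem chunks_ok (m : Nat) :
    ∀ g ∈ chunk2 (if (hexU m).length % 2 = 1 then '0' :: hexU m else hexU m),
      g ≠ [] ∧ ∀ c ∈ g, PySem.Chars.isspace c = false := by
  intro g hg
  obtain ⟨h1, h2⟩ := chunk2_groups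
    (if (hexU m).length % 2 = 1 then '0' :: hexU m else hexU m).length _ le_rfl g hg
  refine ⟨h1, fun c hc => ?_⟩
  have hcs := h2 c hc
  have hcm : c ∈ pyHexDigits := by
    by_cases hp : (hexU m).length % 2 = 1
    · simp only [hp, if_true] at hcs
      rcases List.mem_cons.mp hcs with h | h
      · subst h; simp [pyHexDigits]
      · exact hexU_chars m c h
    · simp only [hp, if_false] at hcs
      exact hexU_chars m c hcs
  fin_cases hcm <;> decide

theorem chunk2_ne_nil (s : List Char) (h : s ≠ []) : chunk2 s ≠ [] := by
  rw [chunk2]; split <;> simp_all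

theorem hexU_ne_nil (m : Nat) : hexU m ≠ [] := by
  rw [hexU]; split <;> simp_all

-- ===== VERDICT (by name: the statement is the Claim_ definition above) =====
theorem conv_endian_spec : Claim_equal_conv_endian := by
  intro num endian _
  unfold Spec_conv_endian
  by_cases he : endian = "big" ∨ endian = "little"
  · by_cases h0 : num = 0
    · subst h0
      have hh : hexU 0 = ['0'] := by rw [hexU]; decide
      rcases he with he | he <;> subst he <;>
        simp [conv_endian, conv_endian_alt, hh, chunk2_cons_cons, chunk2_nil,
          PySem.Chars.join_singleton]
    · unfold conv_endian conv_endian_alt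
      simp only [he, not_true, if_true, h0, if_neg, not_false_iff]
      set m := num.natAbs with hm
      have hm1 : 1 ≤ m := by omega
      have habs : (if num < 0 then |num| else num) = (m : Int) := by
        by_cases hn : num < 0
        · rw [if_pos hn, abs_of_neg hn]; omega
        · rw [if_neg hn]; omega
      rw [habs, convALoop_eq m 0 []]
      have hfix := hx_eq m hm1
      have hok := chunks_ok m
      have hch_ne : chunk2 (if (hexU m).length % 2 = 1 then '0' :: hexU m else hexU m) ≠ [] := by
        apply chunk2_ne_nil
        split <;> simp [hexU_ne_nil]
      rcases he with he | he <;> subst he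
      · -- big endian
        simp only [show ¬("big" = "little") from by decide, if_neg, not_false_iff]
        rw [hfix]
      · -- little endian
        rw [hfix]
        have := split0_join _ hch_ne hok []
        show some (String.ofList (if num < 0 then
            '-' :: PySem.Chars.join [' '] ((PySem.Chars.split₀ (PySem.Chars.join [' '] _)).reverse)
          else _)) = _
        rw [show PySem.Chars.split₀ (PySem.Chars.join [' ']
              (chunk2 (if (hexU m).length % 2 = 1 then '0' :: hexU m else hexU m)))
            = chunk2 (if (hexU m).length % 2 = 1 then '0' :: hexU m else hexU m) from by
          unfold PySem.Chars.split₀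
          simpa using this]
        simp
  · unfold conv_endian conv_endian_alt
    simp [he]
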